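-- pv_equiv track=rewrite | github.com/humblefoo02/ICPC-Tehran | I_Suika.py | planting_flowers
-- ===== SOURCE A (Python) =====
-- def planting_flowers(m, n):
--     MOD = 1000000007
--
--     # Handle small grids separately
--     if m == 1 and n == 1:
--         return 2
--     elif m == 1 and n == 2:
--         return 2
--     elif m == 2 and n == 1:
--         return 2
--     elif m == 2 and n == 2:
--         return 4
--
--     # Initialize the dp array
--     dp = [[0] * 2 for _ in range(n)]
--     dp[0][0] = dp[0][1] = 1
--
--     # Fill the dp array
--     for i in range(1, m):
--         new_dp = [[0] * 2 for _ in range(n)]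
--         for j in range(n):
--             for k in range(2):
--                 for dj in [-1, 0, 1]:
--                     nj = j + dj
--                     if 0 <= nj < n:
--                         new_dp[nj][1 - k] += dp[j][k]
--                         new_dp[nj][1 - k] %= MOD
--         dp = new_dp
--
--     # Sum up the results for all possible ending configurations
--     result = sum(map(sum, dp))
--
--     return result % MOD
-- ===== SOURCE B (Python) =====
-- def planting_flowers(m, n):
--     MOD = 1000000007
--     # one 1-D row: the two color-parity states are always equal, so keep one copy
--     a = [0] * n
--     a[0] = 1
--     for _ in range(1, m):
--         a = [(x + y + z) % MOD for x, y, z in zip([0] + a[:-1], a, a[1:] + [0])]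
--     return 2 * sum(a) % MOD
-- ===== Notes on version B (the rewrite author's own statement) =====
-- stated objective: simpler
-- what changed: Replaces the 2-color 2D push-style DP (six guarded in-place accumulate-and-mod updates per cell) and the four small-grid special cases by a single 1-D row rebuilt each step with a pull-style zip of the row with its two shifts, returning 2*sum since the two color states are provably always equal.
import Mathlib
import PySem

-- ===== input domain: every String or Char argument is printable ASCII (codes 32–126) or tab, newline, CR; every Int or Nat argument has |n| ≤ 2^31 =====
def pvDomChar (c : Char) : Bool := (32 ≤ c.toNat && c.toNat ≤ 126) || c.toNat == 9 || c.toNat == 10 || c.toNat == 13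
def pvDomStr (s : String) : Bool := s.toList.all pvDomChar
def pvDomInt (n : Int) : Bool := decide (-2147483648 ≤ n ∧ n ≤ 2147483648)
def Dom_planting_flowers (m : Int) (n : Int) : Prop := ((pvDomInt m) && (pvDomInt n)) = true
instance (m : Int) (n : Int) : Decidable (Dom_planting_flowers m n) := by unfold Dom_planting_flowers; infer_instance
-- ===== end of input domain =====

-- B replaces the 2-color 2D push-style DP and the four special cases by a single 1-D pull-style row,
-- returning 2*sum (the two color states of A are always equal): simpler, same asymptotics.

-- ===== PORT A =====
-- Python lists mutated in place are ported as Arrays (O(1) update); indices are in range on admitted inputs.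
-- nested in-place update new_dp[i][k] = f(new_dp[i][k])
def pvAModify2 (d : Array (Array Int)) (i k : Nat) (f : Int → Int) : Array (Array Int) :=
  d.setIfInBounds i ((d.getD i #[]).setIfInBounds k (f ((d.getD i #[]).getD k 0)))

-- nested in-place assignment dp[i][k] = v
def pvASet2 (d : Array (Array Int)) (i k : Nat) (v : Int) : Array (Array Int) :=
  d.setIfInBounds i ((d.getD i #[]).setIfInBounds k v)

-- body of A's 'for j in range(n)' loop: the k- and dj-loops with their guarded accumulate-then-mod
def pvABodyJ (n : Int) (dp : Array (Array Int)) (nd : Array (Array Int)) (j : Int) :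
    Array (Array Int) :=
  ([0, 1] : List Int).foldl (fun nd k =>
    ([-1, 0, 1] : List Int).foldl (fun nd dj =>
      if 0 ≤ j + dj ∧ j + dj < n then
        pvAModify2
          (pvAModify2 nd (j + dj).toNat (1 - k).toNat
            (fun x => x + (dp.getD j.toNat #[]).getD k.toNat 0))
          (j + dj).toNat (1 - k).toNat (fun x => x % 1000000007)
      else nd) nd) nd

-- one iteration of A's 'for i in range(1, m)' loop
def pvAStepA (n : Int) (dp : Array (Array Int)) : Array (Array Int) :=
  (PySem.List.pyRange 0 n 1).foldl (pvABodyJ n dp)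
    (((PySem.List.pyRange 0 n 1).map (fun _ => (#[0, 0] : Array Int))).toArray)

def planting_flowers (m : Int) (n : Int) : Int :=
  if m = 1 ∧ n = 1 then 2
  else if m = 1 ∧ n = 2 then 2
  else if m = 2 ∧ n = 1 then 2
  else if m = 2 ∧ n = 2 then 4
  else
    let dp0 := ((PySem.List.pyRange 0 n 1).map (fun _ => (#[0, 0] : Array Int))).toArray
    let dp0 := pvASet2 (pvASet2 dp0 0 0 1) 0 1 1
    let dp := (PySem.List.pyRange 1 m 1).foldl (fun dp _ => pvAStepA n dp) dp0
    ((dp.toList.map (fun r => r.toList.sum)).sum) % 1000000007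

-- ===== PORT B =====
-- one iteration of B's loop: zip the row with its two shifts and reduce mod
def pvStepB (a : List Int) : List Int :=
  ((0 :: a.dropLast).zip (a.zip (a.drop 1 ++ [0]))).map
    (fun p => (p.1 + p.2.1 + p.2.2) % 1000000007)

def planting_flowers_alt (m : Int) (n : Int) : Int :=
  let a := (List.replicate n.toNat (0 : Int)).set 0 1
  let a := (PySem.List.pyRange 1 m 1).foldl (fun a _ => pvStepB a) a
  2 * a.sum % 1000000007

-- ===== PRECONDITION & SPEC =====
-- Pre_ excludes n ≤ 0, where both A and B raise IndexError (dp[0] / a[0] on an empty list).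
def Pre_planting_flowers (m : Int) (n : Int) : Prop := 1 ≤ n
instance (m : Int) (n : Int) : Decidable (Pre_planting_flowers m n) := by unfold Pre_planting_flowers; infer_instance
def pvWitness_planting_flowers : Int × Int := (3, 4)

def Spec_planting_flowers (m : Int) (n : Int) (out : Int) : Prop := out = planting_flowers_alt m n
instance (m : Int) (n : Int) (out : Int) : Decidable (Spec_planting_flowers m n out) := by unfold Spec_planting_flowers; infer_instance

-- ===== CLAIM (what is proved, stated in full; the proofs are below) =====
def Claim_equal_planting_flowers : Prop := ∀ (m : Int) (n : Int), Dom_planting_flowers m n → Pre_planting_flowers m n → Spec_planting_flowers m n (planting_flowers m n)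

-- ===== LEMMAS AND PROOFS =====

-- list-level models of A's mutation steps (the Array port is bridged to these below)
def pvModify2 (l : List (List Int)) (i k : Nat) (f : Int → Int) : List (List Int) :=
  l.set i ((l.getD i []).set k (f ((l.getD i []).getD k 0)))

def pvSet2 (l : List (List Int)) (i k : Nat) (v : Int) : List (List Int) :=
  l.set i ((l.getD i []).set k v)

def pvBodyJ (n : Int) (dp : List (List Int)) (nd : List (List Int)) (j : Int) : List (List Int) :=
  ([0, 1] : List Int).foldl (fun nd k =>
    ([-1, 0, 1] : List Int).foldl (fun nd dj =>
      if 0 ≤ j + dj ∧ j + dj < n then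
        pvModify2
          (pvModify2 nd (j + dj).toNat (1 - k).toNat
            (fun x => x + (dp.getD j.toNat []).getD k.toNat 0))
          (j + dj).toNat (1 - k).toNat (fun x => x % 1000000007)
      else nd) nd) nd

def pvStepA (n : Int) (dp : List (List Int)) : List (List Int) :=
  (PySem.List.pyRange 0 n 1).foldl (pvBodyJ n dp)
    ((PySem.List.pyRange 0 n 1).map (fun _ => ([0, 0] : List Int)))

def pvToArr (l : List (List Int)) : Array (Array Int) := (l.map List.toArray).toArray

lemma pvArr_getD (xs : List Int) (k : Nat) : xs.toArray.getD k 0 = xs.getD k 0 := by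
  unfold Array.getD
  split
  · next h => simp [List.getD_eq_getElem?_getD, List.getElem?_eq_getElem (by simpa using h)]
  · next h => simp [List.getD_eq_getElem?_getD, List.getElem?_eq_none (by simp at h; omega : xs.length ≤ k)]

lemma pvToArr_getD (l : List (List Int)) (i : Nat) :
    (pvToArr l).getD i #[] = (l.getD i []).toArray := by
  unfold pvToArr Array.getD
  split
  · next h =>
    simp at h
    simp [List.getD_eq_getElem?_getD, List.getElem?_eq_getElem h]
  · next h =>
    simp at h
    simp [List.getD_eq_getElem?_getD, List.getElem?_eq_none h]

lemma pvToArr_set (l : List (List Int)) (i : Nat) (ys : List Int) :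
    (pvToArr l).setIfInBounds i ys.toArray = pvToArr (l.set i ys) := by
  unfold pvToArr
  rw [List.setIfInBounds_toArray]
  congr 1
  rw [List.map_set]

lemma pvAModify2_bridge (l : List (List Int)) (i k : Nat) (f : Int → Int) :
    pvAModify2 (pvToArr l) i k f = pvToArr (pvModify2 l i k f) := by
  unfold pvAModify2 pvModify2
  rw [pvToArr_getD, pvArr_getD, List.setIfInBounds_toArray (l.getD i []), pvToArr_set]

lemma pvCondBridge (c : Prop) [Decidable c] (x : List (List Int)) (p κ : Nat)
    (f1 f2 : Int → Int) :
    (if c then pvAModify2 (pvAModify2 (pvToArr x) p κ f1) p κ f2 else pvToArr x)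
    = pvToArr (if c then pvModify2 (pvModify2 x p κ f1) p κ f2 else x) := by
  split_ifs
  · rw [pvAModify2_bridge, pvAModify2_bridge]
  · rfl

lemma pvABodyJ_bridge (n : Int) (dp nd : List (List Int)) (j : Int) :
    pvABodyJ n (pvToArr dp) (pvToArr nd) j = pvToArr (pvBodyJ n dp nd j) := by
  have hd : ∀ k : Nat, ((pvToArr dp).getD j.toNat #[]).getD k 0 =
      (dp.getD j.toNat []).getD k 0 := by
    intro k; rw [pvToArr_getD, pvArr_getD]
  unfold pvABodyJ pvBodyJ
  simp only [List.foldl, hd]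
  rw [pvCondBridge, pvCondBridge, pvCondBridge, pvCondBridge, pvCondBridge, pvCondBridge]

lemma pvAStepA_bridge (n : Int) (dp : List (List Int)) :
    pvAStepA n (pvToArr dp) = pvToArr (pvStepA n dp) := by
  unfold pvAStepA pvStepA
  have hinit : ((PySem.List.pyRange 0 n 1).map (fun _ => (#[0, 0] : Array Int))).toArray =
      pvToArr ((PySem.List.pyRange 0 n 1).map (fun _ => ([0, 0] : List Int))) := by
    unfold pvToArr
    rw [List.map_map]
    rfl
  rw [hinit]
  generalize (PySem.List.pyRange 0 n 1).map (fun _ => ([0, 0] : List Int)) = x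
  induction (PySem.List.pyRange 0 n 1) generalizing x with
  | nil => rfl
  | cons y l ih => rw [List.foldl_cons, List.foldl_cons, pvABodyJ_bridge]; exact ih _

lemma pvAFold_bridge (n : Int) (l : List Int) (x : List (List Int)) :
    l.foldl (fun dp _ => pvAStepA n dp) (pvToArr x) =
    pvToArr (l.foldl (fun dp _ => pvStepA n dp) x) := by
  induction l generalizing x with
  | nil => rfl
  | cons y l ih => rw [List.foldl_cons, List.foldl_cons, pvAStepA_bridge]; exact ih _

lemma pvASet2_bridge (l : List (List Int)) (i k : Nat) (v : Int) :
    pvASet2 (pvToArr l) i k v = pvToArr (pvSet2 l i k v) := by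
  unfold pvASet2 pvSet2
  rw [pvToArr_getD, List.setIfInBounds_toArray (l.getD i []), pvToArr_set]

lemma pvSum_bridge (l : List (List Int)) :
    ((pvToArr l).toList.map (fun r => r.toList.sum)).sum = (l.map (fun r => r.sum)).sum := by
  unfold pvToArr
  simp [List.map_map, Function.comp_def]

def pvGrid (N : Nat) (c0 c1 : Nat → Int) : List (List Int) :=
  (List.range N).map (fun i => [c0 i, c1 i])

lemma pvGrid_getD {N : Nat} {c0 c1 : Nat → Int} {i : Nat} (h : i < N) :
    (pvGrid N c0 c1).getD i [] = [c0 i, c1 i] := by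
  simp [pvGrid, List.getD_eq_getElem?_getD, h]

lemma pvGrid_congr {N : Nat} {f0 f1 g0 g1 : Nat → Int}
    (h0 : ∀ i < N, f0 i = g0 i) (h1 : ∀ i < N, f1 i = g1 i) :
    pvGrid N f0 f1 = pvGrid N g0 g1 := by
  unfold pvGrid
  apply List.map_congr_left
  intro i hi
  rw [List.mem_range] at hi
  rw [h0 i hi, h1 i hi]

lemma pvModify2_grid0 {N : Nat} {c0 c1 : Nat → Int} {p : Nat} (hp : p < N) (f : Int → Int) :
    pvModify2 (pvGrid N c0 c1) p 0 f =
    pvGrid N (fun i => if i = p then f (c0 i) else c0 i) c1 := by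
  unfold pvModify2
  rw [pvGrid_getD hp]
  apply List.ext_getElem
  · simp [pvGrid]
  · intro i h1 h2
    simp only [pvGrid, List.getElem_set, List.getElem_map, List.getElem_range,
      List.getD_cons_zero, List.set_cons_zero]
    by_cases h : i = p
    · simp [h]
    · simp [h, Ne.symm h]

lemma pvModify2_grid1 {N : Nat} {c0 c1 : Nat → Int} {p : Nat} (hp : p < N) (f : Int → Int) :
    pvModify2 (pvGrid N c0 c1) p 1 f =
    pvGrid N c0 (fun i => if i = p then f (c1 i) else c1 i) := by
  unfold pvModify2
  rw [pvGrid_getD hp]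
  apply List.ext_getElem
  · simp [pvGrid]
  · intro i h1 h2
    simp only [pvGrid, List.getElem_set, List.getElem_map, List.getElem_range,
      List.getD_cons_zero, List.getD_cons_succ, List.set_cons_succ, List.set_cons_zero]
    by_cases h : i = p
    · simp [h]
    · simp [h, Ne.symm h]

lemma pvCondTouch0 {n : Int} {N : Nat} (hN : (N : Int) = n) (c0 c1 : Nat → Int) (nj d : Int) :
    (if 0 ≤ nj ∧ nj < n then
       pvModify2 (pvModify2 (pvGrid N c0 c1) nj.toNat 0 (fun x => x + d)) nj.toNat 0
         (fun x => x % 1000000007)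
     else pvGrid N c0 c1)
    = pvGrid N (fun i => if (i : Int) = nj then (c0 i + d) % 1000000007 else c0 i) c1 := by
  split_ifs with hg
  · rw [pvModify2_grid0 (show nj.toNat < N by omega), pvModify2_grid0 (show nj.toNat < N by omega)]
    refine pvGrid_congr (fun i hi => ?_) (fun _ _ => rfl)
    by_cases h : (i : Int) = nj
    · have h' : i = nj.toNat := by omega
      have h'' : ((nj.toNat : Nat) : Int) = nj := by omega
      simp [h', h'']
    · have h' : i ≠ nj.toNat := by omega
      simp [h, h']
  · refine pvGrid_congr (fun i hi => ?_) (fun _ _ => rfl)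
    have h : ¬((i : Int) = nj) := by omega
    simp [h]

lemma pvCondTouch1 {n : Int} {N : Nat} (hN : (N : Int) = n) (c0 c1 : Nat → Int) (nj d : Int) :
    (if 0 ≤ nj ∧ nj < n then
       pvModify2 (pvModify2 (pvGrid N c0 c1) nj.toNat 1 (fun x => x + d)) nj.toNat 1
         (fun x => x % 1000000007)
     else pvGrid N c0 c1)
    = pvGrid N c0 (fun i => if (i : Int) = nj then (c1 i + d) % 1000000007 else c1 i) := by
  split_ifs with hg
  · rw [pvModify2_grid1 (show nj.toNat < N by omega), pvModify2_grid1 (show nj.toNat < N by omega)]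
    refine pvGrid_congr (fun _ _ => rfl) (fun i hi => ?_)
    by_cases h : (i : Int) = nj
    · have h' : i = nj.toNat := by omega
      have h'' : ((nj.toNat : Nat) : Int) = nj := by omega
      simp [h', h'']
    · have h' : i ≠ nj.toNat := by omega
      simp [h, h']
  · refine pvGrid_congr (fun _ _ => rfl) (fun i hi => ?_)
    have h : ¬((i : Int) = nj) := by omega
    simp [h]

lemma pvBodyJ_grid {n : Int} {N : Nat} (hN : (N : Int) = n) {t : Nat} (ht : t < N)
    (f c0 c1 : Nat → Int) :
    pvBodyJ n (pvGrid N f f) (pvGrid N c0 c1) (t : Int) =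
    pvGrid N (fun i => if i + 1 = t ∨ i = t ∨ i = t + 1 then (c0 i + f t) % 1000000007 else c0 i)
             (fun i => if i + 1 = t ∨ i = t ∨ i = t + 1 then (c1 i + f t) % 1000000007 else c1 i) := by
  have e1 : ((1 : Int) - 0).toNat = 1 := rfl
  have e2 : ((1 : Int) - 1).toNat = 0 := rfl
  have e3 : ((0 : Int)).toNat = 0 := rfl
  have e4 : ((1 : Int)).toNat = 1 := rfl
  have hd0 : ((pvGrid N f f).getD ((t : Int)).toNat []).getD 0 0 = f t := by
    rw [Int.toNat_natCast, pvGrid_getD ht]; rfl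
  have hd1 : ((pvGrid N f f).getD ((t : Int)).toNat []).getD 1 0 = f t := by
    rw [Int.toNat_natCast, pvGrid_getD ht]; rfl
  unfold pvBodyJ
  simp only [List.foldl, e1, e2, e3, e4, hd0, hd1]
  rw [pvCondTouch1 hN, pvCondTouch1 hN, pvCondTouch1 hN,
      pvCondTouch0 hN, pvCondTouch0 hN, pvCondTouch0 hN]
  refine pvGrid_congr (fun i hi => ?_) (fun i hi => ?_) <;>
    split_ifs <;> first | rfl | omega

def pvS (a : List Int) (t i : Nat) : Int :=
  (if 1 ≤ i ∧ i - 1 < t then a.getD (i - 1) 0 else 0) +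
  (if i < t then a.getD i 0 else 0) +
  (if i + 1 < t then a.getD (i + 1) 0 else 0)

lemma pvS_succ (a : List Int) (t i : Nat) :
    pvS a (t + 1) i =
    pvS a t i + (if i + 1 = t ∨ i = t ∨ i = t + 1 then a.getD t 0 else 0) := by
  by_cases h2 : i = t
  · subst h2; unfold pvS; split_ifs <;> omega
  · by_cases h1 : i + 1 = t
    · have : t = i + 1 := by omega
      subst this; unfold pvS; split_ifs <;> omega
    · by_cases h3 : i = t + 1
      · subst h3; unfold pvS
        simp only [Nat.add_sub_cancel]
        split_ifs <;> first | omega | (exfalso; tauto)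
      · unfold pvS; split_ifs <;> omega

lemma pvFoldJ {n : Int} {N : Nat} (hN : (N : Int) = n) (a : List Int) :
    ∀ t : Nat, t ≤ N →
      (PySem.List.pyRange 0 (t : Int) 1).foldl
          (pvBodyJ n (pvGrid N (fun i => a.getD i 0) (fun i => a.getD i 0)))
          (pvGrid N (fun _ => 0) (fun _ => 0)) =
      pvGrid N (fun i => pvS a t i % 1000000007) (fun i => pvS a t i % 1000000007) := by
  intro t
  induction t with
  | zero =>
    intro _
    rw [PySem.List.pyRange_one_eq_nil (by norm_num)]
    simp only [List.foldl_nil]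
    exact pvGrid_congr (fun i _ => by simp [pvS]) (fun i _ => by simp [pvS])
  | succ t ih =>
    intro hle
    have hc : ((t + 1 : Nat) : Int) = (t : Int) + 1 := by push_cast; ring
    rw [hc, PySem.List.pyRange_one_succ_right (by positivity), List.foldl_append,
        ih (by omega), List.foldl_cons, List.foldl_nil, pvBodyJ_grid hN (by omega)]
    refine pvGrid_congr (fun i hi => ?_) (fun i hi => ?_) <;>
      · rw [pvS_succ]
        by_cases h : i + 1 = t ∨ i = t ∨ i = t + 1
        · simp [h, Int.emod_add_emod]
        · simp [h]

lemma pvStepA_eq {n : Int} (hn : 1 ≤ n) (a : List Int) :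
    pvStepA n (pvGrid n.toNat (fun i => a.getD i 0) (fun i => a.getD i 0)) =
    pvGrid n.toNat (fun i => pvS a n.toNat i % 1000000007)
                   (fun i => pvS a n.toNat i % 1000000007) := by
  have hN : ((n.toNat : Nat) : Int) = n := by omega
  unfold pvStepA
  have hinit : (PySem.List.pyRange 0 n 1).map (fun _ => ([0, 0] : List Int)) =
      pvGrid n.toNat (fun _ => 0) (fun _ => 0) := by
    rw [List.map_const']
    unfold pvGrid
    rw [List.map_const']
    simp [PySem.List.length_pyRange_one]
  rw [hinit, show PySem.List.pyRange 0 n 1 = PySem.List.pyRange 0 ((n.toNat : Nat) : Int) 1 by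
    rw [hN]]
  exact pvFoldJ hN a n.toNat le_rfl

lemma pvStepB_eq {n : Int} (hn : 1 ≤ n) (a : List Int) (ha : a.length = n.toNat) :
    pvStepB a = (List.range n.toNat).map (fun i => pvS a n.toNat i % 1000000007) := by
  apply List.ext_getElem
  · simp [pvStepB, ha]; omega
  · intro i h1 h2
    simp only [pvStepB, List.length_map, List.length_range] at h2 ⊢
    simp only [List.getElem_map, List.getElem_range, List.getElem_zip]
    have hx : (0 :: a.dropLast)[i]'(by simp [ha]; omega) =
        if 1 ≤ i ∧ i - 1 < n.toNat then a.getD (i - 1) 0 else 0 := by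
      cases i with
      | zero => simp
      | succ j =>
        rw [List.getElem_cons_succ, List.getElem_dropLast, if_pos (by constructor <;> omega)]
        simp [List.getD_eq_getElem?_getD, List.getElem?_eq_getElem (by omega : j < a.length)]
    have hy : a[i]'(by omega) = if i < n.toNat then a.getD i 0 else 0 := by
      rw [if_pos h2]
      simp [List.getD_eq_getElem?_getD, List.getElem?_eq_getElem (by omega : i < a.length)]
    have hz : (a.drop 1 ++ [0])[i]'(by simp [ha]; omega) =
        if i + 1 < n.toNat then a.getD (i + 1) 0 else 0 := by
      by_cases hdi : i + 1 < n.toNat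
      · rw [List.getElem_append_left (by simp [ha]; omega), if_pos hdi]
        rw [List.getElem_drop]
        simp only [Nat.add_comm 1 i]
        simp [List.getD_eq_getElem?_getD, List.getElem?_eq_getElem (by omega : i + 1 < a.length)]
      · rw [List.getElem_append_right (by simp [ha]; omega), if_neg hdi]
        simp
    rw [hx, hy, hz]
    rfl


lemma pvStepB_len {n : Int} (hn : 1 ≤ n) (a : List Int) (ha : a.length = n.toNat) :
    (pvStepB a).length = n.toNat := by
  rw [pvStepB_eq hn a ha]; simp

lemma pvGetD_stepB {n : Int} (hn : 1 ≤ n) (a : List Int) (ha : a.length = n.toNat)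
    {i : Nat} (hi : i < n.toNat) :
    (pvStepB a).getD i 0 = pvS a n.toNat i % 1000000007 := by
  rw [pvStepB_eq hn a ha]
  simp [List.getD_eq_getElem?_getD, hi]

lemma pvOuter {n : Int} (hn : 1 ≤ n) (l : List Int) :
    ∀ a : List Int, a.length = n.toNat →
      l.foldl (fun dp _ => pvStepA n dp)
          (pvGrid n.toNat (fun i => a.getD i 0) (fun i => a.getD i 0)) =
      pvGrid n.toNat (fun i => (l.foldl (fun a _ => pvStepB a) a).getD i 0)
                     (fun i => (l.foldl (fun a _ => pvStepB a) a).getD i 0) := by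
  induction l with
  | nil => intro a _; rfl
  | cons x l ih =>
    intro a ha
    rw [List.foldl_cons, List.foldl_cons]
    have : pvStepA n (pvGrid n.toNat (fun i => a.getD i 0) (fun i => a.getD i 0)) =
        pvGrid n.toNat (fun i => (pvStepB a).getD i 0) (fun i => (pvStepB a).getD i 0) := by
      rw [pvStepA_eq hn a]
      exact pvGrid_congr (fun i hi => (pvGetD_stepB hn a ha hi).symm)
        (fun i hi => (pvGetD_stepB hn a ha hi).symm)
    rw [this]
    exact ih (pvStepB a) (pvStepB_len hn a ha)

lemma pvMapGetD (a : List Int) : (List.range a.length).map (fun i => a.getD i 0) = a := by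
  apply List.ext_getElem
  · simp
  · intro i h1 h2
    simp [List.getD_eq_getElem?_getD, h2]

lemma pvFoldB_len {n : Int} (hn : 1 ≤ n) (l : List Int) :
    ∀ a : List Int, a.length = n.toNat →
      (l.foldl (fun a _ => pvStepB a) a).length = n.toNat := by
  induction l with
  | nil => intro a ha; exact ha
  | cons x l ih => intro a ha; rw [List.foldl_cons]; exact ih (pvStepB a) (pvStepB_len hn a ha)

lemma pvInitGrid {n : Int} :
    (PySem.List.pyRange 0 n 1).map (fun _ => ([0, 0] : List Int)) =
    pvGrid n.toNat (fun _ => 0) (fun _ => 0) := by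
  rw [List.map_const']
  unfold pvGrid
  rw [List.map_const']
  simp [PySem.List.length_pyRange_one]

lemma pvGeneralList {m n : Int} (hn : 1 ≤ n) :
    (((PySem.List.pyRange 1 m 1).foldl (fun dp _ => pvStepA n dp)
        (pvSet2 (pvSet2 ((PySem.List.pyRange 0 n 1).map (fun _ => ([0, 0] : List Int))) 0 0 1)
          0 1 1)).map (fun r => r.sum)).sum % 1000000007
    = planting_flowers_alt m n := by
  have h0N : 0 < n.toNat := by omega
  have ha0 : ((List.replicate n.toNat (0 : Int)).set 0 1).length = n.toNat := by simp
  have hinit :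
      pvSet2 (pvSet2 ((PySem.List.pyRange 0 n 1).map (fun _ => ([0, 0] : List Int))) 0 0 1) 0 1 1
      = pvGrid n.toNat (fun i => ((List.replicate n.toNat (0 : Int)).set 0 1).getD i 0)
                       (fun i => ((List.replicate n.toNat (0 : Int)).set 0 1).getD i 0) := by
    rw [pvInitGrid,
        show ∀ l i k v, pvSet2 l i k v = pvModify2 l i k (fun _ => v) from fun _ _ _ _ => rfl,
        show ∀ l i k v, pvSet2 l i k v = pvModify2 l i k (fun _ => v) from fun _ _ _ _ => rfl,
        pvModify2_grid0 h0N, pvModify2_grid1 h0N]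
    refine pvGrid_congr (fun i hi => ?_) (fun i hi => ?_) <;>
      · by_cases h : i = 0
        · subst h; simp [List.getD_eq_getElem?_getD, h0N]
        · simp [List.getD_eq_getElem?_getD, h, Ne.symm h, hi]
  rw [hinit, pvOuter hn _ _ ha0]
  have hlen := pvFoldB_len hn (PySem.List.pyRange 1 m 1)
    ((List.replicate n.toNat (0 : Int)).set 0 1) ha0
  unfold planting_flowers_alt
  simp only [pvGrid, List.map_map]
  have hsum : ((List.range n.toNat).map
      ((fun r => List.sum r) ∘ fun i =>
        [((PySem.List.pyRange 1 m 1).foldl (fun a _ => pvStepB a)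
            ((List.replicate n.toNat (0 : Int)).set 0 1)).getD i 0,
         ((PySem.List.pyRange 1 m 1).foldl (fun a _ => pvStepB a)
            ((List.replicate n.toNat (0 : Int)).set 0 1)).getD i 0])).sum
      = 2 * ((PySem.List.pyRange 1 m 1).foldl (fun a _ => pvStepB a)
            ((List.replicate n.toNat (0 : Int)).set 0 1)).sum := by
    set aF := (PySem.List.pyRange 1 m 1).foldl (fun a _ => pvStepB a)
      ((List.replicate n.toNat (0 : Int)).set 0 1) with haF
    simp only [Function.comp_def, List.sum_cons, List.sum_nil, add_zero]
    rw [PySem.List.sum_map_add_int, ← hlen, pvMapGetD, two_mul]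
  rw [hsum]

lemma pvGeneral {m n : Int} (hn : 1 ≤ n) :
    (((PySem.List.pyRange 1 m 1).foldl (fun dp _ => pvAStepA n dp)
        (pvASet2 (pvASet2 (((PySem.List.pyRange 0 n 1).map
            (fun _ => (#[0, 0] : Array Int))).toArray) 0 0 1) 0 1 1)).toList.map
      (fun r => r.toList.sum)).sum % 1000000007
    = planting_flowers_alt m n := by
  have h1 : ((PySem.List.pyRange 0 n 1).map (fun _ => (#[0, 0] : Array Int))).toArray =
      pvToArr ((PySem.List.pyRange 0 n 1).map (fun _ => ([0, 0] : List Int))) := by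
    unfold pvToArr
    rw [List.map_map]
    rfl
  rw [h1, pvASet2_bridge, pvASet2_bridge, pvAFold_bridge, pvSum_bridge]
  exact pvGeneralList hn

-- ===== VERDICT (by name: the statement is the Claim_ definition above) =====
theorem planting_flowers_spec : Claim_equal_planting_flowers := by
  intro m n _ hpre
  unfold Spec_planting_flowers planting_flowers
  have hn : 1 ≤ n := hpre
  split_ifs with h1 h2 h3 h4
  · obtain ⟨hm, hn'⟩ := h1; subst hm; subst hn'; decide
  · obtain ⟨hm, hn'⟩ := h2; subst hm; subst hn'; decide
  · obtain ⟨hm, hn'⟩ := h3; subst hm; subst hn'; decide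
  · obtain ⟨hm, hn'⟩ := h4; subst hm; subst hn'; decide
  · exact pvGeneral hn
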